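-- pv_equiv track=rewrite | github.com/AdamZhouSE/pythonHomework | Code/CodeRecords/2590/60691/284356.py | gender
-- ===== SOURCE A (Python) =====
-- def gender(s):
--     l = []
--     for i in range(len(s)):
--         l.append(s[i])
--
--     l1 = []
--     for i in range(len(l)):
--         if l.count(l[i]) == 1:
--             l1.append(l[i])
--
--     if len(l1) % 2 == 0:
--         return "SHE!"
--     else:
--         return "HE!"
-- ===== SOURCE B (Python) =====
-- def gender(s):
--     t = sorted(s)
--     singles = 0
--     i = 0
--     while i < len(t):
--         j = i + 1
--         while j < len(t) and t[j] == t[i]: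
--             j += 1
--         if j == i + 1:
--             singles += 1
--         i = j
--     return "SHE!" if singles % 2 == 0 else "HE!"
-- ===== Notes on version B (the rewrite author's own statement) =====
-- stated objective: faster
-- what changed: Sort-then-scan: B sorts the characters once and walks the sorted sequence grouping consecutive equal runs, counting runs of length 1, instead of A's per-position full-list .count scans.
import Mathlib
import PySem

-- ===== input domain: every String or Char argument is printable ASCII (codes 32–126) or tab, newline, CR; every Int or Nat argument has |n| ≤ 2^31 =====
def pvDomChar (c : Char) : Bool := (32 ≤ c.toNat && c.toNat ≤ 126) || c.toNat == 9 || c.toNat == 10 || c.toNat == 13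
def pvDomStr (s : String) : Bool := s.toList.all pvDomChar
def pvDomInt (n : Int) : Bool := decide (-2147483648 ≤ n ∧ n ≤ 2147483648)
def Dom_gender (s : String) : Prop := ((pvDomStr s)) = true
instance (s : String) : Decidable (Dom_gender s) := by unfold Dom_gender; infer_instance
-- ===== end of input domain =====

-- B sorts the characters once and counts length-1 runs in one scan over the sorted
-- list, instead of A's per-position full-list count scans; objective: faster (asymptotic).


-- ===== PORT A =====
def gender (s : String) : String :=
  let cs := s.toList
  let l := (PySem.List.pyRange 0 (PySem.List.len cs) 1).foldl
      (fun acc i => acc ++ [PySem.List.pyGetD cs i ' ']) []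
  let l1 := (PySem.List.pyRange 0 (PySem.List.len l) 1).foldl
      (fun acc i => if l.count (PySem.List.pyGetD l i ' ') == 1
                    then acc ++ [PySem.List.pyGetD l i ' '] else acc) []
  if l1.length % 2 == 0 then "SHE!" else "HE!"

-- ===== PORT B =====
-- Source B's outer while-loop walks the sorted list run by run (the inner while advances j
-- past the run of t[i]); it is ported as the structural recursion on the remaining
-- suffix: takeWhile (· == c) is the rest of the current run, dropWhile its tail.
def pvRuns (t : List Char) : Nat :=
  match t with
  | [] => 0
  | c :: rest =>
      (if (rest.takeWhile (fun x => x == c)).length = 0 then 1 else 0)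
        + pvRuns (rest.dropWhile (fun x => x == c))
termination_by t.length
decreasing_by
  simp only [List.length_cons]
  exact Nat.lt_succ_of_le (List.length_dropWhile_le _ _)

def gender_alt (s : String) : String :=
  let t := PySem.List.sorted s.toList (fun c => c) false
  let singles := pvRuns t
  if singles % 2 == 0 then "SHE!" else "HE!"

-- ===== PRECONDITION & SPEC =====
def Spec_gender (s : String) (out : String) : Prop := out = gender_alt s
instance (s : String) (out : String) : Decidable (Spec_gender s out) := by unfold Spec_gender; infer_instance

-- ===== CLAIM (what is proved, stated in full; the proofs are below) =====
def Claim_equal_gender : Prop := ∀ (s : String), Dom_gender s → Spec_gender s (gender s)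

-- ===== LEMMAS AND PROOFS =====

lemma foldl_append_id (l : List Char) (acc : List Char) :
    l.foldl (fun a v => a ++ [v]) acc = acc ++ l := by
  induction l generalizing acc with
  | nil => simp
  | cons x xs ih => simp [List.foldl_cons, ih]

lemma genderA_eq (s : String) :
    gender s = (if (s.toList.filter (fun c => s.toList.count c == 1)).length % 2 == 0
                then "SHE!" else "HE!") := by
  unfold gender
  simp only []
  rw [PySem.List.foldl_pyRange_pyGetD s.toList ' ' (fun acc v => acc ++ [v]) [] (by omega)]
  simp only [Int.toNat_zero, List.drop_zero, foldl_append_id, List.nil_append]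
  rw [PySem.List.foldl_pyRange_pyGetD s.toList ' '
      (fun acc c => if s.toList.count c == 1 then acc ++ [c] else acc) [] (by omega)]
  simp only [Int.toNat_zero, List.drop_zero, PySem.List.foldl_append_if_eq_filter,
    List.nil_append]

-- the number of positions holding a once-occurring char = the number of such distinct chars
lemma filter_count_one_length (l : List Char) :
    (l.filter (fun c => l.count c == 1)).length
      = (l.toFinset.filter (fun c => l.count c = 1)).card := by
  have hnd : (l.filter (fun c => l.count c == 1)).Nodup := by
    rw [List.nodup_iff_count_le_one]
    intro c
    by_cases h : (l.count c == 1) = true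
    · have hle := (List.filter_sublist (l := l) (p := fun x => l.count x == 1)).count_le c
      simp only [beq_iff_eq] at h
      omega
    · have hnm : c ∉ l.filter (fun x => l.count x == 1) := by simp [h]
      rw [List.count_eq_zero_of_not_mem hnm]
      omega
  rw [← List.toFinset_card_of_nodup hnd]
  congr 1
  ext c
  simp

-- every element remaining after dropping the leading run of c is strictly above c
lemma dropWhile_head_lt (c : Char) (rest : List Char)
    (hpc : ∀ x ∈ rest, c ≤ x) (hpr : rest.Pairwise (· ≤ ·)) :
    ∀ x ∈ rest.dropWhile (fun y => y == c), c < x := by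
  intro x hx
  have hne : rest.dropWhile (fun y => y == c) ≠ [] := List.ne_nil_of_mem hx
  have hdne := List.head_dropWhile_not (fun y => y == c) hne
  have hcons := (List.cons_head_tail hne)
  have hpd : (rest.dropWhile (fun y => y == c)).Pairwise (· ≤ ·) :=
    hpr.sublist (List.dropWhile_sublist _)
  have hdmem : (rest.dropWhile (fun y => y == c)).head hne ∈ rest :=
    (List.dropWhile_sublist _).subset (List.head_mem hne)
  have hdne' : (rest.dropWhile (fun y => y == c)).head hne ≠ c := by
    simpa using hdne
  have hch : c < (rest.dropWhile (fun y => y == c)).head hne :=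
    lt_of_le_of_ne (hpc _ hdmem) (Ne.symm hdne')
  rw [← hcons] at hx hpd
  rcases List.mem_cons.mp hx with rfl | hx'
  · exact hch
  · exact lt_of_lt_of_le hch ((List.pairwise_cons.mp hpd).1 x hx')

-- on a sorted list, pvRuns counts exactly the distinct chars of count 1
lemma pvRuns_sorted (t : List Char) (h : t.Pairwise (· ≤ ·)) :
    pvRuns t = (t.toFinset.filter (fun c => t.count c = 1)).card := by
  induction t using pvRuns.induct with
  | case1 => simp [pvRuns]
  | case2 c rest ih =>
    have hpc : ∀ x ∈ rest, c ≤ x := (List.pairwise_cons.mp h).1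
    have hpr : rest.Pairwise (· ≤ ·) := (List.pairwise_cons.mp h).2
    set tk := rest.takeWhile (fun x => x == c) with htk
    set dr := rest.dropWhile (fun x => x == c) with hdr
    have hsplit : rest = tk ++ dr := (List.takeWhile_append_dropWhile).symm
    have htkc : ∀ x ∈ tk, x = c := by
      intro x hx
      have := List.mem_takeWhile_imp hx
      simpa using this
    have hpd : dr.Pairwise (· ≤ ·) := hpr.sublist (List.dropWhile_sublist _)
    have hlt : ∀ x ∈ dr, c < x := dropWhile_head_lt c rest hpc hpr
    have hcnd : c ∉ dr := fun hc => lt_irrefl c (hlt c hc)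
    have hcount_tk : tk.count c = tk.length := by
      rw [List.count_eq_length.mpr]
      intro x hx; simp [htkc x hx]
    have hdr0 : dr.count c = 0 := List.count_eq_zero_of_not_mem hcnd
    have hcount_c : (c :: rest).count c = 1 + tk.length := by
      rw [List.count_cons_self, hsplit, List.count_append, hcount_tk, hdr0]
      omega
    have hcount_dr : ∀ x ∈ dr, (c :: rest).count x = dr.count x := by
      intro x hx
      have hxc : x ≠ c := (hlt x hx).ne'
      have h1 : tk.count x = 0 :=
        List.count_eq_zero_of_not_mem (fun hm => hxc (htkc x hm))
      rw [hsplit]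
      simp [List.count_append, h1, Ne.symm hxc]
    have hfs : (c :: rest).toFinset = insert c dr.toFinset := by
      ext x
      simp only [List.toFinset_cons, Finset.mem_insert, List.mem_toFinset]
      constructor
      · rintro (rfl | hx)
        · exact Or.inl rfl
        · rw [hsplit] at hx
          rcases List.mem_append.mp hx with hx' | hx'
          · exact Or.inl (htkc x hx')
          · exact Or.inr hx'
      · rintro (rfl | hx)
        · exact Or.inl rfl
        · exact Or.inr (by rw [hsplit]; exact List.mem_append.mpr (Or.inr hx))
    have hcmem : c ∉ dr.toFinset := by simpa using hcnd
    have hcongr : dr.toFinset.filter (fun x => (c :: rest).count x = 1)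
        = dr.toFinset.filter (fun x => dr.count x = 1) := by
      apply Finset.filter_congr
      intro x hx
      rw [hcount_dr x (List.mem_toFinset.mp hx)]
    rw [pvRuns, ← htk, ← hdr, hfs, Finset.filter_insert]
    by_cases hone : (c :: rest).count c = 1
    · have htk0 : tk.length = 0 := by omega
      rw [if_pos hone, if_pos htk0,
        Finset.card_insert_of_notMem (fun hm => hcmem (Finset.mem_filter.mp hm).1),
        hcongr, ← ih hpd]
      omega
    · have htk0 : ¬ tk.length = 0 := by omega
      rw [if_neg hone, if_neg htk0, hcongr, ← ih hpd]
      omega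

-- ===== VERDICT (by name: the statement is the Claim_ definition above) =====
theorem gender_spec : Claim_equal_gender := by
  intro s _
  unfold Spec_gender
  have hperm : (PySem.List.sorted s.toList (fun c => c) false).Perm s.toList :=
    PySem.List.sorted_perm _ _ _
  have hpw : (PySem.List.sorted s.toList (fun c => c) false).Pairwise (· ≤ ·) := by
    simpa using PySem.List.sorted_pairwise s.toList (fun c => c)
  have hfeq : (PySem.List.sorted s.toList (fun c => c) false).toFinset = s.toList.toFinset := by
    ext x; simp [List.mem_toFinset, hperm.mem_iff]
  have hset : (PySem.List.sorted s.toList (fun c => c) false).toFinset.filter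
        (fun c => (PySem.List.sorted s.toList (fun c => c) false).count c = 1)
      = s.toList.toFinset.filter (fun c => s.toList.count c = 1) := by
    rw [hfeq]
    apply Finset.filter_congr
    intro x _
    rw [hperm.count_eq]
  rw [genderA_eq]
  unfold gender_alt
  simp only []
  rw [pvRuns_sorted _ hpw, hset, filter_count_one_length]
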